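-- pv_equiv track=rewrite | github.com/vibhaalbus14/DSA | 41.captureEnemyForts.py | captureForts
-- ===== SOURCE A (Python) =====
-- def captureForts(forts):
--     n=len(forts)
--     max_count=0
--     for index in range(n):
--         if(forts[index]==1):
--             #check by moving the pointer towards right
--             count=0
--             for ptr in range(index+1,n):
--                 if forts[ptr]==0:
--                     count+=1
--                 elif forts[ptr]==-1:
--                     #stop
--                     max_count=max(count,max_count)
--                     break
--                 else:
--                     break
--
--             # check by moving the pointer towards left
--             count=0
--             for ptr in range(index-1,-1,-1):
--                 if forts[ptr]==0:
--                     count+=1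
--                 elif forts[ptr]==-1:
--                     #stop
--                     max_count=max(count,max_count)
--                     break
--                 else:
--                     break
--     return max_count
-- ===== SOURCE B (Python) =====
-- def captureForts(forts):
--     best = 0
--     last = None   # value of the last non-zero fort seen
--     zeros = 0     # zeros since that fort
--     for x in forts:
--         if x == 0:
--             zeros += 1
--         else:
--             if (last == 1 and x == -1) or (last == -1 and x == 1):
--                 best = max(best, zeros)
--             last = x
--             zeros = 0
--     return best
-- ===== Notes on version B (the rewrite author's own statement) =====
-- stated objective: simpler
-- what changed: Replaces A's nested per-1 bidirectional zero-counting index scans by a single left-to-right pass that keeps the last non-zero value seen and the number of zeros since it, counting a gap only when the adjacent non-zero pair is literally {1,-1}.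
import Mathlib
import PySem

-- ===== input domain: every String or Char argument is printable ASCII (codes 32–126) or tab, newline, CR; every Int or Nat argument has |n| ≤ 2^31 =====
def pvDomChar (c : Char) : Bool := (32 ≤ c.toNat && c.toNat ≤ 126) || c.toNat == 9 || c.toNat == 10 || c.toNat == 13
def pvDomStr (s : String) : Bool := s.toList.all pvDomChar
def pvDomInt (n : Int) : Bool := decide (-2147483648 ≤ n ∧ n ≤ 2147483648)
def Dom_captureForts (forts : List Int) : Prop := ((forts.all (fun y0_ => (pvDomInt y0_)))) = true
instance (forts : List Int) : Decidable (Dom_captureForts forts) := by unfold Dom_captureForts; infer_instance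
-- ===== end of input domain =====

-- B replaces A's per-1 bidirectional index scans by one left-to-right pass over the list keeping
-- (last non-zero value, zeros since it); only literal 1/-1 neighbours with only zeros between count.

-- ===== PORT A =====
-- both inner `for ptr in range(...)` loops of A have the same body (count zeros, stop at -1
-- recording max(count, max_count), stop at any other non-zero): one helper, recursing on the
-- index list, transliterates them; `break` = returning without consuming the rest.
def innerScan (forts : List Int) (js : List Int) (count maxCount : Int) : Int :=
  match js with
  | [] => maxCount
  | ptr :: rest =>
    if PySem.List.pyGetD forts ptr 0 = 0 then innerScan forts rest (count + 1) maxCount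
    else if PySem.List.pyGetD forts ptr 0 = -1 then max count maxCount
    else maxCount

def captureForts (forts : List Int) : Int :=
  let n := PySem.List.len forts
  (PySem.List.pyRange 0 n 1).foldl
    (fun maxCount index =>
      if PySem.List.pyGetD forts index 0 = 1 then
        let m1 := innerScan forts (PySem.List.pyRange (index + 1) n 1) 0 maxCount
        innerScan forts (PySem.List.pyRange (index - 1) (-1) (-1)) 0 m1
      else maxCount) 0

-- ===== PORT B =====
-- single fold with state (best, last non-zero value seen, zeros since it), as in Source B.
def captureForts_alt (forts : List Int) : Int :=
  (forts.foldl
    (fun (st : Int × Option Int × Int) x =>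
      if x = 0 then (st.1, st.2.1, st.2.2 + 1)
      else ((if (st.2.1 = some 1 ∧ x = -1) ∨ (st.2.1 = some (-1) ∧ x = 1) then max st.1 st.2.2 else st.1), some x, 0))
    (0, none, 0)).1

-- ===== PRECONDITION & SPEC =====
def Spec_captureForts (forts : List Int) (out : Int) : Prop := out = captureForts_alt forts
instance (forts : List Int) (out : Int) : Decidable (Spec_captureForts forts out) := by unfold Spec_captureForts; infer_instance

-- ===== CLAIM (what is proved, stated in full; the proofs are below) =====
def Claim_equal_captureForts : Prop := ∀ (forts : List Int), Dom_captureForts forts → Spec_captureForts forts (captureForts forts)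

-- ===== LEMMAS AND PROOFS =====

/-- Structural scan of a suffix: count zeros starting from `z`; `some c` exactly when the first
non-zero element is `-1`, reached after `c - z` zeros. Mirrors one inner loop of A. -/
def rC : Int -> List Int -> Option Int
  | _, [] => none
  | z, x :: xs => if x = 0 then rC (z + 1) xs else if x = -1 then some z else none

/-- A's right-scan contribution folded into a running maximum. -/
def rContrib (xs : List Int) (m : Int) : Int :=
  match rC 0 xs with | some c => max c m | none => m

/-- Structural form of A's outer loop over the remaining suffix, with the left context summarised
as (value of last non-zero in the prefix, number of zeros after it). -/
def A2 : Option Int -> Int -> List Int -> Int -> Int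
  | _, _, [], m => m
  | last, z, x :: xs, m =>
    if x = 1 then
      A2 (some 1) 0 xs (if last = some (-1) then max z (rContrib xs m) else rContrib xs m)
    else if x = 0 then A2 last (z + 1) xs m
    else A2 (some x) 0 xs m

/-- Structural form of B's fold. -/
def G : Option Int -> Int -> List Int -> Int -> Int
  | _, _, [], m => m
  | last, z, x :: xs, m =>
    if x = 0 then G last (z + 1) xs m
    else G (some x) 0 xs (if (last = some 1 ∧ x = -1) ∨ (last = some (-1) ∧ x = 1) then max m z else m)

def outerStep (forts : List Int) (maxCount index : Int) : Int :=
  if PySem.List.pyGetD forts index 0 = 1 then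
    let m1 := innerScan forts (PySem.List.pyRange (index + 1) (PySem.List.len forts) 1) 0 maxCount
    innerScan forts (PySem.List.pyRange (index - 1) (-1) (-1)) 0 m1
  else maxCount

-- step equations
lemma rC_zero (z : Int) (xs : List Int) : rC z (0 :: xs) = rC (z + 1) xs := by norm_num [rC]
lemma rC_neg (z : Int) (xs : List Int) : rC z ((-1) :: xs) = some z := by norm_num [rC]
lemma rC_other (z x : Int) (xs : List Int) (hx0 : x ≠ 0) (hxm : x ≠ -1) : rC z (x :: xs) = none := by
  simp [rC, hx0, hxm]
lemma A2_one (l : Option Int) (z m : Int) (xs : List Int) :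
    A2 l z (1 :: xs) m = A2 (some 1) 0 xs (if l = some (-1) then max z (rContrib xs m) else rContrib xs m) := by
  norm_num [A2]
lemma A2_zero (l : Option Int) (z m : Int) (xs : List Int) : A2 l z (0 :: xs) m = A2 l (z + 1) xs m := by
  norm_num [A2]
lemma A2_other (l : Option Int) (z m x : Int) (xs : List Int) (hx1 : x ≠ 1) (hx0 : x ≠ 0) :
    A2 l z (x :: xs) m = A2 (some x) 0 xs m := by simp [A2, hx1, hx0]
lemma G_zero (l : Option Int) (z m : Int) (xs : List Int) : G l z (0 :: xs) m = G l (z + 1) xs m := by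
  norm_num [G]
lemma G_cons (l : Option Int) (z m x : Int) (xs : List Int) (hx0 : x ≠ 0) :
    G l z (x :: xs) m
    = G (some x) 0 xs (if (l = some 1 ∧ x = -1) ∨ (l = some (-1) ∧ x = 1) then max m z else m) := by
  simp [G, hx0]

lemma getD_append_self (p xs : List Int) (x d : Int) : (p ++ x :: xs).getD p.length d = x := by
  simp [List.getD]

lemma capture_eq_fold (forts : List Int) :
    captureForts forts = (PySem.List.pyRange 0 (PySem.List.len forts) 1).foldl (outerStep forts) 0 := rfl

lemma inner_right (xs : List Int) : ∀ (p : List Int) (count maxc : Int),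
    innerScan (p ++ xs) (PySem.List.pyRange (p.length : Int) (PySem.List.len (p ++ xs)) 1) count maxc
    = (match rC count xs with | some c => max c maxc | none => maxc) := by
  induction xs with
  | nil =>
    intro p count maxc
    rw [show ((p.length:Int)) = PySem.List.len (p ++ ([]:List Int)) by simp, PySem.List.pyRange_one_eq_nil le_rfl]
    simp [innerScan, rC]
  | cons x xs ih =>
    intro p count maxc
    rw [PySem.List.pyRange_one_cons (by simp only [PySem.List.len_eq, List.length_append, List.length_cons]; push_cast; omega)]
    have hget : PySem.List.pyGetD (p ++ x :: xs) (p.length : Int) 0 = x := by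
      rw [PySem.List.pyGetD_natCast]; exact getD_append_self p xs x 0
    have hassoc : p ++ x :: xs = (p ++ [x]) ++ xs := by simp
    have hlen1 : ((p.length : Int) + 1) = (((p ++ [x]).length : Int)) := by simp
    by_cases hx0 : x = 0
    · subst hx0
      simp only [innerScan, hget]
      rw [if_true, hassoc, hlen1, ih (p ++ [0]) (count + 1) maxc]
      simp [rC]
    · by_cases hx1 : x = -1
      · subst hx1; simp [innerScan, hget, rC]
      · simp [innerScan, hget, hx0, hx1, rC]

lemma inner_left (q : List Int) : ∀ (xs : List Int) (count maxc : Int),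
    innerScan (q.reverse ++ xs) (PySem.List.pyRange ((q.length : Int) - 1) (-1) (-1)) count maxc
    = (match rC count q with | some c => max c maxc | none => maxc) := by
  induction q with
  | nil =>
    intro xs count maxc
    rw [PySem.List.pyRange_neg_one_eq_nil (by simp)]
    simp [innerScan, rC]
  | cons a q ih =>
    intro xs count maxc
    have hlen : ((a :: q).length : Int) - 1 = (q.length : Int) := by simp
    rw [hlen, PySem.List.pyRange_neg_one_cons (by omega)]
    have hget : PySem.List.pyGetD ((a :: q).reverse ++ xs) (q.length : Int) 0 = a := by
      have h : (a :: q).reverse ++ xs = q.reverse ++ a :: xs := by simp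
      rw [h]
      rw [show ((q.length : Int)) = ((q.reverse.length : Int)) by simp, PySem.List.pyGetD_natCast]
      exact getD_append_self q.reverse xs a 0
    by_cases ha0 : a = 0
    · subst ha0
      simp only [innerScan, hget]
      have h2 : ((0:Int) :: q).reverse ++ xs = q.reverse ++ ((0:Int) :: xs) := by simp
      rw [if_true, h2, ih (0 :: xs) (count + 1) maxc]
      simp [rC]
    · by_cases ha1 : a = -1
      · subst ha1; simp only [innerScan, hget, rC]; norm_num
      · simp only [innerScan, hget, rC]; simp [ha0, ha1]

lemma outer_eq (xs : List Int) : ∀ (p : List Int) (last : Option Int) (z maxc : Int),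
    (∀ c0 : Int, rC c0 p.reverse = (if last = some (-1) then some (c0 + z) else none)) →
    (PySem.List.pyRange (p.length : Int) (PySem.List.len (p ++ xs)) 1).foldl (outerStep (p ++ xs)) maxc
    = A2 last z xs maxc := by
  induction xs with
  | nil =>
    intro p last z maxc _
    rw [show ((p.length:Int)) = PySem.List.len (p ++ ([]:List Int)) by simp, PySem.List.pyRange_one_eq_nil le_rfl]
    simp [A2]
  | cons x xs ih =>
    intro p last z maxc H
    rw [PySem.List.pyRange_one_cons (by simp only [PySem.List.len_eq, List.length_append, List.length_cons]; push_cast; omega)]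
    rw [List.foldl_cons]
    have hget : PySem.List.pyGetD (p ++ x :: xs) (p.length : Int) 0 = x := by
      rw [PySem.List.pyGetD_natCast]; exact getD_append_self p xs x 0
    have hassoc : p ++ x :: xs = (p ++ [x]) ++ xs := by simp
    have hlen1 : ((p.length : Int) + 1) = (((p ++ [x]).length : Int)) := by simp
    have key : ∀ (last' : Option Int) (z' m' : Int),
        (∀ c0 : Int, rC c0 (x :: p.reverse) = (if last' = some (-1) then some (c0 + z') else none)) →
        (PySem.List.pyRange ((p.length : Int) + 1) (PySem.List.len (p ++ x :: xs)) 1).foldl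
          (outerStep (p ++ x :: xs)) m' = A2 last' z' xs m' := by
      intro last' z' m' H'
      have h := ih (p ++ [x]) last' z' m' (by simpa using H')
      rw [← hassoc, ← hlen1] at h
      exact h
    by_cases hx1 : x = 1
    · subst hx1
      have hr : innerScan (p ++ 1 :: xs)
          (PySem.List.pyRange ((p.length : Int) + 1) (PySem.List.len (p ++ 1 :: xs)) 1) 0 maxc
          = (match rC 0 xs with | some c => max c maxc | none => maxc) := by
        have h := inner_right xs (p ++ [1]) 0 maxc
        rw [← hassoc, ← hlen1] at h
        exact h
      have hstep : outerStep (p ++ 1 :: xs) maxc (p.length : Int)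
          = (if last = some (-1) then max z (rContrib xs maxc) else rContrib xs maxc) := by
        unfold outerStep
        rw [hget, if_pos rfl, hr]
        have h := inner_left p.reverse (1 :: xs) 0
          (match rC 0 xs with | some c => max c maxc | none => maxc)
        simp only [List.reverse_reverse, List.length_reverse] at h
        rw [h, H 0]
        by_cases hlast : last = some (-1)
        · simp [hlast, rContrib]
        · simp [hlast, rContrib]
      rw [hstep, key (some 1) 0 _ (by intro c0; simp [rC]), A2_one]
    · have hstep : outerStep (p ++ x :: xs) maxc (p.length : Int) = maxc := by
        unfold outerStep
        rw [hget, if_neg hx1]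
      rw [hstep]
      by_cases hx0 : x = 0
      · subst hx0
        rw [key last (z + 1) maxc (by
          intro c0
          rw [rC_zero, H (c0 + 1), show c0 + 1 + z = c0 + (z + 1) by ring])]
        rw [A2_zero]
      · by_cases hxm : x = -1
        · subst hxm
          rw [key (some (-1)) 0 maxc (by intro c0; simp [rC]), A2_other _ _ _ _ _ hx1 hx0]
        · rw [key (some x) 0 maxc (by intro c0; simp [rC, hx0, hxm]), A2_other _ _ _ _ _ hx1 hx0]

lemma Gle (xs : List Int) : ∀ (l : Option Int) (z m : Int), m ≤ G l z xs m := by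
  induction xs with
  | nil => intro l z m; simp [G]
  | cons x xs ih =>
    intro l z m
    by_cases hx0 : x = 0
    · subst hx0; rw [G_zero]; exact ih l (z + 1) m
    · rw [G_cons _ _ _ _ _ hx0]
      refine le_trans ?_ (ih (some x) 0 _)
      split <;> simp

lemma Gm0 (xs : List Int) : ∀ (l : Option Int) (z m : Int), 0 ≤ m →
    G l z xs m = max m (G l z xs 0) := by
  induction xs with
  | nil => intro l z m hm; simp [G]; omega
  | cons x xs ih =>
    intro l z m hm
    by_cases hx0 : x = 0
    · subst hx0; rw [G_zero, G_zero]; exact ih l (z + 1) m hm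
    · rw [G_cons _ _ _ _ _ hx0, G_cons _ _ _ _ _ hx0]
      have g0 : (0:Int) ≤ G (some x) 0 xs 0 := Gle xs (some x) 0 0
      by_cases hp : (l = some 1 ∧ x = -1) ∨ (l = some (-1) ∧ x = 1)
      · rw [if_pos hp, if_pos hp, ih _ _ (max m z) (le_trans hm (le_max_left _ _)),
          ih _ _ (max 0 z) (le_max_left _ _)]
        simp only [Int.max_def]
        split_ifs <;> omega
      · rw [if_neg hp, if_neg hp, ih _ _ m hm, ih _ _ 0 le_rfl]

lemma rC_le_G (xs : List Int) : ∀ (z0 c : Int), rC z0 xs = some c → c ≤ G (some 1) z0 xs 0 := by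
  induction xs with
  | nil => intro z0 c h; simp [rC] at h
  | cons x xs ih =>
    intro z0 c h
    by_cases hx0 : x = 0
    · subst hx0
      rw [rC_zero] at h
      rw [G_zero]
      exact ih (z0 + 1) c h
    · by_cases hxm : x = -1
      · subst hxm
        rw [rC_neg] at h
        have hc : c = z0 := by simpa using h.symm
        subst hc
        rw [G_cons _ _ _ _ _ hx0, if_pos (Or.inl ⟨rfl, rfl⟩)]
        have hle : max (0:Int) c ≤ G (some (-1)) 0 xs (max 0 c) := Gle xs _ _ _
        exact le_trans (le_max_right 0 c) hle
      · rw [rC_other _ _ _ hx0 hxm] at h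
        exact absurd h (by simp)

lemma main_eq (xs : List Int) : ∀ (last : Option Int) (z m : Int), 0 ≤ m →
    (last = some 1 → ∀ c, rC z xs = some c → c ≤ m) →
    A2 last z xs m = G last z xs m := by
  induction xs with
  | nil => intro last z m _ _; simp [A2, G]
  | cons x xs ih =>
    intro last z m hm H
    by_cases hx0 : x = 0
    · subst hx0
      rw [A2_zero, G_zero]
      exact ih last (z + 1) m hm (fun hl c hc => H hl c (by rw [rC_zero]; exact hc))
    · by_cases hx1 : x = 1
      · subst hx1
        rw [A2_one]
        set m2 : Int := (if last = some (-1) then max z (rContrib xs m) else rContrib xs m) with hm2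
        have hm1m : m ≤ rContrib xs m := by unfold rContrib; cases hrc : rC 0 xs <;> simp
        have hm2m : rContrib xs m ≤ m2 := by rw [hm2]; split <;> simp
        have hmm2 : (0:Int) ≤ m2 := le_trans hm (le_trans hm1m hm2m)
        rw [ih (some 1) 0 m2 hmm2
          (by intro _ c hc
              have h1 : max c m ≤ rContrib xs m := by unfold rContrib; rw [hc]
              exact le_trans (le_trans (le_max_left c m) h1) hm2m)]
        rw [G_cons _ _ _ _ _ hx0]
        have hpair : ((last = some 1 ∧ (1:Int) = -1) ∨ (last = some (-1) ∧ (1:Int) = 1)) ↔ last = some (-1) := by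
          constructor
          · rintro (⟨_, h⟩ | ⟨h, _⟩)
            · exact absurd h (by norm_num)
            · exact h
          · intro h; exact Or.inr ⟨h, rfl⟩
        rw [if_congr hpair rfl rfl]
        set b' : Int := (if last = some (-1) then max m z else m) with hb'
        have hb'm : m ≤ b' := by rw [hb']; split <;> simp
        have g0 : (0:Int) ≤ G (some 1) 0 xs 0 := Gle xs (some 1) 0 0
        rw [Gm0 xs (some 1) 0 m2 hmm2, Gm0 xs (some 1) 0 b' (le_trans hm hb'm)]
        rw [hm2, hb']
        unfold rContrib
        cases hrc : rC 0 xs with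
        | none =>
          by_cases hlast : last = some (-1)
          · simp only [hlast, reduceIte, Int.max_def]
            split_ifs <;> omega
          · simp only [hlast, reduceIte, Int.max_def]
        | some c =>
          have hcg : c ≤ G (some 1) 0 xs 0 := rC_le_G xs 0 c hrc
          by_cases hlast : last = some (-1)
          · simp only [hlast, reduceIte, Int.max_def]
            split_ifs <;> omega
          · simp only [hlast, reduceIte, Int.max_def]
            split_ifs <;> omega
      · rw [A2_other _ _ _ _ _ hx1 hx0, G_cons _ _ _ _ _ hx0]
        by_cases hxm : x = -1
        · subst hxm
          rw [ih (some (-1)) 0 m hm (by intro h; exact absurd h (by norm_num))]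
          have hpair : ((last = some 1 ∧ (-1:Int) = -1) ∨ (last = some (-1) ∧ (-1:Int) = 1)) ↔ last = some 1 := by
            constructor
            · rintro (⟨h, _⟩ | ⟨_, h⟩)
              · exact h
              · exact absurd h (by norm_num)
            · intro h; exact Or.inl ⟨h, rfl⟩
          rw [if_congr hpair rfl rfl]
          by_cases hlast : last = some 1
          · have hz : z ≤ m := H hlast z (by rw [rC_neg])
            rw [if_pos hlast, show max m z = m by omega]
          · rw [if_neg hlast]
        · rw [ih (some x) 0 m hm (by intro h; simp at h; exact absurd h hx1)]
          rw [if_neg (by rintro (⟨_, h⟩ | ⟨_, h⟩) <;> [exact hxm h; exact hx1 h])]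

lemma alt_eq_G (xs : List Int) : ∀ (l : Option Int) (z m : Int),
    (xs.foldl
      (fun (st : Int × Option Int × Int) x =>
        if x = 0 then (st.1, st.2.1, st.2.2 + 1)
        else ((if (st.2.1 = some 1 ∧ x = -1) ∨ (st.2.1 = some (-1) ∧ x = 1) then max st.1 st.2.2 else st.1), some x, 0))
      (m, l, z)).1 = G l z xs m := by
  induction xs with
  | nil => intro l z m; simp [G]
  | cons x xs ih =>
    intro l z m
    by_cases hx0 : x = 0
    · subst hx0
      rw [List.foldl_cons, G_zero]
      simpa using ih l (z + 1) m
    · rw [List.foldl_cons, G_cons _ _ _ _ _ hx0]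
      simpa [hx0] using ih (some x) 0 (if (l = some 1 ∧ x = -1) ∨ (l = some (-1) ∧ x = 1) then max m z else m)

-- ===== VERDICT (by name: the statement is the Claim_ definition above) =====
theorem captureForts_spec : Claim_equal_captureForts := by
  intro forts _
  unfold Spec_captureForts
  have hA : captureForts forts = A2 none 0 forts 0 := by
    rw [capture_eq_fold]
    have h := outer_eq forts [] none 0 0 (by intro c0; simp [rC])
    simpa using h
  have hB : captureForts_alt forts = G none 0 forts 0 := by
    unfold captureForts_alt
    exact alt_eq_G forts none 0 0
  rw [hA, hB, main_eq forts none 0 0 le_rfl (by intro h; simp at h)]
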